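-- pv_equiv track=rewrite | github.com/universalattacks/universalattacks | verification/keyrecovery/keyanalysis.py | derive_involved_key_positions
-- ===== SOURCE A (Python) =====
-- inv_kp_left = [0, 11, 58, 29, 47, 36, 100, 49, 111, 33, 83, 73, 76, 68, 118, 65, 20, 57, 63, 35, 80, 89, 4, 106, 12, 116, 115, 97, 42, 70, 75, 24, 119, 26, 95, 81, 9, 39, 40, 113, 102, 105, 50, 67, 125, 54, 60, 28, 7, 107, 74, 41, 92, 1, 16, 109, 85, 82, 37, 69, 127, 8, 31, 62, 79, 30, 25, 13, 86, 18, 48, 123, 103, 3, 99, 55, 45, 72, 124, 108, 53, 93, 44, 27, 90, 101, 122, 2, 114, 38, 77, 87, 51, 15, 22, 5, 126, 59, 91, 6, 121, 34, 110, 17, 52, 96, 43, 61, 10, 64, 117, 21, 19, 104, 56, 120, 88, 112, 78, 14, 98, 46, 23, 32, 84, 71, 94, 66]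
--
-- inv_kp_right = [57, 39, 6, 90, 51, 95, 101, 86, 63, 97, 75, 8, 33, 127, 14, 47, 76, 37, 25, 124, 83, 71, 103, 56, 94, 123, 61, 98, 89, 20, 1, 4, 60, 121, 105, 3, 18, 68, 66, 12, 116, 74, 48, 108, 53, 80, 5, 34, 19, 24, 81, 36, 118, 2, 70, 91, 107, 22, 85, 113, 40, 28, 72, 122, 111, 79, 38, 87, 119, 64, 32, 43, 82, 125, 26, 54, 0, 96, 112, 7, 21, 44, 29, 109, 58, 27, 69, 11, 62, 55, 106, 13, 92, 115, 67, 77, 41, 16, 117, 104, 50, 15, 99, 93, 46, 30, 102, 59, 88, 84, 10, 35, 120, 52, 45, 23, 42, 78, 17, 114, 110, 65, 100, 73, 49, 9, 31, 126]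
--
-- def derive_involved_key_positions(offset, active_indices):
--     """
--     Given the offset and activeness pattern of S-boxes in 1-round key reccovery,
--     this function return the involved key bits in two branches as well as the intersection of them.
--     """
--
--     active_indices = [4*i + j for i in active_indices for j in range(4)]
--     inv_kp_left_at_roundr = [[0 for i in range(128)] for _ in range(offset + 1)]
--     inv_kp_right_at_roundr = [[0 for i in range(128)] for _ in range(offset + 1)]
--     inv_kp_left_at_roundr[0] = [inv_kp_left[i] for i in range(128)]
--     inv_kp_right_at_roundr[0] = [inv_kp_right[i] for i in range(128)]
--
--     for r in range(1, offset + 1):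
--         for i in range(128):
--             inv_kp_left_at_roundr[r][i] = inv_kp_left[inv_kp_left_at_roundr[r - 1][i]]
--             inv_kp_right_at_roundr[r][i] = inv_kp_right[inv_kp_right_at_roundr[r - 1][i]]
--
--     involved_key_bits_left = []
--     involved_key_bits_right = []
--
--     for i in range(128):
--         if i in active_indices:
--             involved_key_bits_left += [inv_kp_left_at_roundr[offset][i]]
--             involved_key_bits_right += [inv_kp_right_at_roundr[offset][i]]
--
--     temp_left = set(involved_key_bits_left)
--     temp_right = set(involved_key_bits_right)
--     intersection = temp_left.intersection(temp_right)
--     common_indices = dict()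
--     for element in intersection:
--         left_index = involved_key_bits_left.index(element)
--         right_index = involved_key_bits_right.index(element)
--         common_indices[left_index] = right_index
--     return involved_key_bits_left, involved_key_bits_right, intersection, common_indices
-- ===== SOURCE B (Python) =====
-- inv_kp_left = [0, 11, 58, 29, 47, 36, 100, 49, 111, 33, 83, 73, 76, 68, 118, 65, 20, 57, 63, 35, 80, 89, 4, 106, 12, 116, 115, 97, 42, 70, 75, 24, 119, 26, 95, 81, 9, 39, 40, 113, 102, 105, 50, 67, 125, 54, 60, 28, 7, 107, 74, 41, 92, 1, 16, 109, 85, 82, 37, 69, 127, 8, 31, 62, 79, 30, 25, 13, 86, 18, 48, 123, 103, 3, 99, 55, 45, 72, 124, 108, 53, 93, 44, 27, 90, 101, 122, 2, 114, 38, 77, 87, 51, 15, 22, 5, 126, 59, 91, 6, 121, 34, 110, 17, 52, 96, 43, 61, 10, 64, 117, 21, 19, 104, 56, 120, 88, 112, 78, 14, 98, 46, 23, 32, 84, 71, 94, 66]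
--
-- inv_kp_right = [57, 39, 6, 90, 51, 95, 101, 86, 63, 97, 75, 8, 33, 127, 14, 47, 76, 37, 25, 124, 83, 71, 103, 56, 94, 123, 61, 98, 89, 20, 1, 4, 60, 121, 105, 3, 18, 68, 66, 12, 116, 74, 48, 108, 53, 80, 5, 34, 19, 24, 81, 36, 118, 2, 70, 91, 107, 22, 85, 113, 40, 28, 72, 122, 111, 79, 38, 87, 119, 64, 32, 43, 82, 125, 26, 54, 0, 96, 112, 7, 21, 44, 29, 109, 58, 27, 69, 11, 62, 55, 106, 13, 92, 115, 67, 77, 41, 16, 117, 104, 50, 15, 99, 93, 46, 30, 102, 59, 88, 84, 10, 35, 120, 52, 45, 23, 42, 78, 17, 114, 110, 65, 100, 73, 49, 9, 31, 126]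
--
--
-- def _compose(p, q):
--     """Permutation composition: (p o q)[i] = p[q[i]]."""
--     return [p[j] for j in q]
--
--
-- def _perm_power(p, k):
--     """p applied k times, by binary exponentiation (O(len(p) * log k))."""
--     result = list(range(len(p)))
--     base = p
--     while k > 0:
--         if k % 2 == 1:
--             result = _compose(base, result)
--         base = _compose(base, base)
--         k //= 2
--     return result
--
--
-- def derive_involved_key_positions(offset, active_indices):
--     active = {4 * i + j for i in active_indices for j in range(4)}
--     pl = _perm_power(inv_kp_left, offset + 1)
--     pr = _perm_power(inv_kp_right, offset + 1)
--     sel = [i for i in range(128) if i in active]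
--     involved_key_bits_left = [pl[i] for i in sel]
--     involved_key_bits_right = [pr[i] for i in sel]
--     right_pos = {v: idx for idx, v in enumerate(involved_key_bits_right)}
--     intersection = set()
--     common_indices = {}
--     for li, v in enumerate(involved_key_bits_left):
--         if v in right_pos:
--             intersection.add(v)
--             common_indices[li] = right_pos[v]
--     return involved_key_bits_left, involved_key_bits_right, intersection, common_indices
-- ===== Notes on version B (the rewrite author's own statement) =====
-- stated objective: faster
-- what changed: B computes the offset+1-st power of each key permutation by binary exponentiation of permutation composition instead of A's round-by-round table of all offset+1 rounds, selects active positions through a precomputed set, and builds the intersection and the index map in one pass over the left list using a value-to-index dict for the right list instead of repeated list.index scans.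
import Mathlib
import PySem

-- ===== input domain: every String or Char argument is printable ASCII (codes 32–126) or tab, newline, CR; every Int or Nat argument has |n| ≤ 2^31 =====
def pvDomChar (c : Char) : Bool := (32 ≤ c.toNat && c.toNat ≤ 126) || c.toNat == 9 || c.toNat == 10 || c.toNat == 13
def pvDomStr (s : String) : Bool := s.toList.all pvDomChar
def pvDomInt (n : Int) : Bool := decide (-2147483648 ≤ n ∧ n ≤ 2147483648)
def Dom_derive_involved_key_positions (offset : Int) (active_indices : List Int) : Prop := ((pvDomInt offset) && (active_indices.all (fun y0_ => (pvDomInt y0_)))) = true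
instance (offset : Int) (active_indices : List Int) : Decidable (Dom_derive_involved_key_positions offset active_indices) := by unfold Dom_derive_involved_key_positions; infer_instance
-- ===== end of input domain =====

-- ===== PORT A =====
-- B re-implements A: permutation powers by binary exponentiation instead of a round-by-round
-- table, set/dict lookups instead of inner list scans (objective: faster).
-- A raises IndexError for offset < 0; Pre_ excludes exactly those inputs.

-- the two fixed inverse key-permutation tables (module constants of A, shared by both ports)
def pvInvKpLeft : List Int := [0, 11, 58, 29, 47, 36, 100, 49, 111, 33, 83, 73, 76, 68, 118, 65, 20, 57, 63, 35, 80, 89, 4, 106, 12, 116, 115, 97, 42, 70, 75, 24, 119, 26, 95, 81, 9, 39, 40, 113, 102, 105, 50, 67, 125, 54, 60, 28, 7, 107, 74, 41, 92, 1, 16, 109, 85, 82, 37, 69, 127, 8, 31, 62, 79, 30, 25, 13, 86, 18, 48, 123, 103, 3, 99, 55, 45, 72, 124, 108, 53, 93, 44, 27, 90, 101, 122, 2, 114, 38, 77, 87, 51, 15, 22, 5, 126, 59, 91, 6, 121, 34, 110, 17, 52, 96, 43, 61, 10, 64, 117, 21, 19, 104, 56, 120, 88, 112, 78, 14, 98,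 46, 23, 32, 84, 71, 94, 66]

def pvInvKpRight : List Int := [57, 39, 6, 90, 51, 95, 101, 86, 63, 97, 75, 8, 33, 127, 14, 47, 76, 37, 25, 124, 83, 71, 103, 56, 94, 123, 61, 98, 89, 20, 1, 4, 60, 121, 105, 3, 18, 68, 66, 12, 116, 74, 48, 108, 53, 80, 5, 34, 19, 24, 81, 36, 118, 2, 70, 91, 107, 22, 85, 113, 40, 28, 72, 122, 111, 79, 38, 87, 119, 64, 32, 43, 82, 125, 26, 54, 0, 96, 112, 7, 21, 44, 29, 109, 58, 27, 69, 11, 62, 55, 106, 13, 92, 115, 67, 77, 41, 16, 117, 104, 50, 15, 99, 93, 46, 30, 102, 59, 88, 84, 10, 35, 120, 52, 45, 23, 42, 78, 17, 114, 110, 65, 100, 73, 49, 9, 31, 126]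

-- [4*i + j for i in active_indices for j in range(4)]  (shared: both pythons build it verbatim)
def pvExpandActive (active_indices : List Int) : List Int :=
  active_indices.flatMap (fun i => (PySem.List.pyRange 0 4 1).map (fun j => 4 * i + j))

-- A's inner loop body: next round's row from the previous one (pyGetD is exact here:
-- every index fed to it is in range 0..127)
def pvStepA (tbl cur : List Int) : List Int :=
  (PySem.List.pyRange 0 128 1).map (fun i => PySem.List.pyGetD tbl (PySem.List.pyGetD cur i 0) 0)

-- rows 1..offset of A's two tables; only the previous row is ever read, so the fold carries it
def pvRowsA (offset : Int) : List Int × List Int :=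
  (PySem.List.pyRange 1 (offset + 1) 1).foldl
    (fun (st : List Int × List Int) _ => (pvStepA pvInvKpLeft st.1, pvStepA pvInvKpRight st.2))
    ((PySem.List.pyRange 0 128 1).map (fun i => PySem.List.pyGetD pvInvKpLeft i 0),
     (PySem.List.pyRange 0 128 1).map (fun i => PySem.List.pyGetD pvInvKpRight i 0))

-- A's selection loop: for i in range(128): if i in active_indices: append both
def pvSelectA (activeList : List Int) (rows : List Int × List Int) : List Int × List Int :=
  (PySem.List.pyRange 0 128 1).foldl
    (fun (st : List Int × List Int) i =>
      if activeList.contains i then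
        (st.1 ++ [PySem.List.pyGetD rows.1 i 0], st.2 ++ [PySem.List.pyGetD rows.2 i 0])
      else st)
    ([], [])

-- A's dict loop (.index via index?; exact: every element is in both lists)
def pvCommonA (lbl lbr inter : List Int) : PySem.Dict Int Int :=
  inter.foldl
    (fun (d : PySem.Dict Int Int) e =>
      d.insert (((PySem.List.index? lbl e).getD 0 : Nat) : Int)
               (((PySem.List.index? lbr e).getD 0 : Nat) : Int))
    PySem.Dict.empty

def derive_involved_key_positions (offset : Int) (active_indices : List Int) :
    List Int × List Int × List Int × (List (Int × Int)) :=
  let activeList := pvExpandActive active_indices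
  let rows := pvRowsA offset
  let sel := pvSelectA activeList rows
  let intersection := PySem.Set.inter (PySem.Set.ofList sel.1) (PySem.Set.ofList sel.2)
  (sel.1, sel.2, intersection, (pvCommonA sel.1 sel.2 intersection).items)

-- ===== PORT B =====
-- permutation composition: (p o q)[i] = p[q[i]]  (pyGetD exact: indices in range at every call)
def pvCompose (p q : List Int) : List Int :=
  q.map (fun j => PySem.List.pyGetD p j 0)

-- binary exponentiation loop of Source B's _perm_power; fuel only makes the loop total
-- (k.toNat strictly decreases at each halving, so k.toNat + 1 rounds always suffice)
def pvPermPowGo (fuel : Nat) (base result : List Int) (k : Int) : List Int :=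
  match fuel with
  | 0 => result
  | fuel + 1 =>
    if 0 < k then
      pvPermPowGo fuel (pvCompose base base)
        (if PySem.Int.mod k 2 = 1 then pvCompose base result else result)
        (PySem.Int.floordiv k 2)
    else result

def pvPermPow (p : List Int) (k : Int) : List Int :=
  pvPermPowGo (k.toNat + 1) p ((List.range p.length).map Int.ofNat) k

-- [i for i in range(128) if i in active]
def pvSelB (activeSet : PySem.Set Int) : List Int :=
  (PySem.List.pyRange 0 128 1).filter (fun i => PySem.Set.contains activeSet i)

-- right_pos = {v: idx for idx, v in enumerate(right)}
def pvRposB (right : List Int) : PySem.Dict Int Int :=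
  (PySem.List.enumerate right 0).foldl (fun (d : PySem.Dict Int Int) p => d.insert p.2 p.1)
    PySem.Dict.empty

-- one pass over enumerate(left) building the intersection set and the index dict
def pvScanB (rpos : PySem.Dict Int Int) (left : List Int) : PySem.Set Int × PySem.Dict Int Int :=
  (PySem.List.enumerate left 0).foldl
    (fun (st : PySem.Set Int × PySem.Dict Int Int) p =>
      if rpos.contains p.2 then (PySem.Set.add st.1 p.2, st.2.insert p.1 (rpos.getD p.2 0))
      else st)
    (PySem.Set.empty, PySem.Dict.empty)

def derive_involved_key_positions_alt (offset : Int) (active_indices : List Int) :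
    List Int × List Int × List Int × (List (Int × Int)) :=
  let activeSet : PySem.Set Int := PySem.Set.ofList (pvExpandActive active_indices)
  let pl := pvPermPow pvInvKpLeft (offset + 1)
  let pr := pvPermPow pvInvKpRight (offset + 1)
  let sel := pvSelB activeSet
  let left := sel.map (fun i => PySem.List.pyGetD pl i 0)
  let right := sel.map (fun i => PySem.List.pyGetD pr i 0)
  let fin := pvScanB (pvRposB right) left
  (left, right, fin.1, fin.2.items)

-- ===== PRECONDITION & SPEC =====
-- A raises IndexError for offset < 0 (its round table then has no row 0 to assign); nothing else raises.
def Pre_derive_involved_key_positions (offset : Int) (active_indices : List Int) : Prop :=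
  0 ≤ offset
instance (offset : Int) (active_indices : List Int) :
    Decidable (Pre_derive_involved_key_positions offset active_indices) := by
  unfold Pre_derive_involved_key_positions; infer_instance

def pvWitness_derive_involved_key_positions : Int × List Int := (1, [0])

def Spec_derive_involved_key_positions (offset : Int) (active_indices : List Int)
    (out : List Int × List Int × List Int × (List (Int × Int))) : Prop :=
  out = derive_involved_key_positions_alt offset active_indices
instance (offset : Int) (active_indices : List Int)
    (out : List Int × List Int × List Int × (List (Int × Int))) :
    Decidable (Spec_derive_involved_key_positions offset active_indices out) := by
  unfold Spec_derive_involved_key_positions; infer_instance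

-- ===== CLAIM (what is proved, stated in full; the proofs are below) =====
def Claim_equal_derive_involved_key_positions : Prop :=
  ∀ (offset : Int) (active_indices : List Int),
    Dom_derive_involved_key_positions offset active_indices →
    Pre_derive_involved_key_positions offset active_indices →
    Spec_derive_involved_key_positions offset active_indices
      (derive_involved_key_positions offset active_indices)

-- ===== LEMMAS AND PROOFS =====

-- a permutation table on 0..127: right length, values in range, no duplicates
def pvGood (p : List Int) : Prop :=
  p.length = 128 ∧ (∀ x ∈ p, 0 ≤ x ∧ x < 128) ∧ p.Nodup

-- the identity permutation, as Source B builds it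
def pvId128 : List Int := (List.range 128).map Int.ofNat

def pvIter (p : List Int) : Nat → List Int
  | 0 => pvId128
  | n + 1 => pvCompose p (pvIter p n)

set_option maxRecDepth 8000 in
theorem pv_good_left : pvGood pvInvKpLeft := by
  refine ⟨by decide, by decide, by decide⟩

set_option maxRecDepth 8000 in
theorem pv_good_right : pvGood pvInvKpRight := by
  refine ⟨by decide, by decide, by decide⟩

theorem pv_id_getElem (k : Nat) (h : k < 128) :
    pvId128[k]'(by simpa [pvId128] using h) = (k : Int) := by
  simp [pvId128, List.getElem_map, List.getElem_range]

theorem pv_good_id : pvGood pvId128 := by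
  refine ⟨by simp [pvId128], ?_, ?_⟩
  · intro x hx
    simp only [pvId128, List.mem_map, List.mem_range] at hx
    obtain ⟨m, hm, rfl⟩ := hx
    show 0 ≤ (m : Int) ∧ (m : Int) < 128
    omega
  · show ((List.range 128).map Int.ofNat).Nodup
    exact List.Nodup.map (fun a b hab => Int.ofNat.inj hab) List.nodup_range

theorem pv_length_compose (p q : List Int) : (pvCompose p q).length = q.length := by
  simp [pvCompose]

theorem pv_getD_compose (p q : List Int) (j : Int) (h0 : 0 ≤ j) (h1 : j < q.length) :
    PySem.List.pyGetD (pvCompose p q) j 0 = PySem.List.pyGetD p (PySem.List.pyGetD q j 0) 0 := by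
  rw [PySem.List.pyGetD_eq_getElem _ _ h0 (by simpa [pv_length_compose] using h1),
      PySem.List.pyGetD_eq_getElem _ _ h0 h1]
  simp [pvCompose]

theorem pv_good_compose (p q : List Int) (hp : pvGood p) (hq : pvGood q) :
    pvGood (pvCompose p q) := by
  obtain ⟨hpl, hpv, hpn⟩ := hp
  obtain ⟨hql, hqv, hqn⟩ := hq
  refine ⟨by simp [pv_length_compose, hql], ?_, ?_⟩
  · intro x hx
    simp only [pvCompose, List.mem_map] at hx
    obtain ⟨j, hj, rfl⟩ := hx
    obtain ⟨hj0, hj1⟩ := hqv j hj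
    rw [PySem.List.pyGetD_eq_getElem _ _ hj0 (by omega)]
    exact hpv _ (List.getElem_mem _)
  · refine List.Nodup.map_on ?_ hqn
    intro a ha b hb hab
    obtain ⟨ha0, ha1⟩ := hqv a ha
    obtain ⟨hb0, hb1⟩ := hqv b hb
    rw [PySem.List.pyGetD_eq_getElem _ _ ha0 (by omega),
        PySem.List.pyGetD_eq_getElem _ _ hb0 (by omega)] at hab
    have := (List.Nodup.getElem_inj_iff hpn).mp hab
    omega

theorem pv_compose_id_right (p : List Int) (h : p.length = 128) :
    pvCompose p pvId128 = p := by
  apply List.ext_getElem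
  · simp [pv_length_compose, pvId128, h]
  · intro k h1 h2
    have hk : k < 128 := by simpa [pv_length_compose, pvId128] using h1
    simp only [pvCompose, List.getElem_map, pv_id_getElem k hk, PySem.List.pyGetD_natCast]
    exact List.getD_eq_getElem p 0 h2

theorem pv_compose_id_left (q : List Int) (hq : ∀ x ∈ q, 0 ≤ x ∧ x < 128) :
    pvCompose pvId128 q = q := by
  have : ∀ j ∈ q, PySem.List.pyGetD pvId128 j 0 = j := by
    intro j hj
    obtain ⟨h0, h1⟩ := hq j hj
    rw [PySem.List.pyGetD_eq_getElem _ _ h0 (by simp [pvId128]; omega),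
        pv_id_getElem j.toNat (by omega)]
    omega
  simpa [pvCompose] using List.map_congr_left this |>.trans (List.map_id q)

theorem pv_compose_assoc (p q r : List Int) (hq : q.length = 128)
    (hr : ∀ x ∈ r, 0 ≤ x ∧ x < 128) :
    pvCompose p (pvCompose q r) = pvCompose (pvCompose p q) r := by
  simp only [pvCompose, List.map_map]
  refine List.map_congr_left ?_
  intro j hj
  obtain ⟨h0, h1⟩ := hr j hj
  simp only [Function.comp]
  exact (pv_getD_compose p q j h0 (by rw [hq]; omega)).symm

theorem pv_iter_good (p : List Int) (hp : pvGood p) : ∀ n, pvGood (pvIter p n)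
  | 0 => pv_good_id
  | n + 1 => pv_good_compose p _ hp (pv_iter_good p hp n)

theorem pv_iter_succ_right (p : List Int) (hp : pvGood p) :
    ∀ n, pvCompose (pvIter p n) p = pvIter p (n + 1)
  | 0 => by
    show pvCompose pvId128 p = pvCompose p pvId128
    rw [pv_compose_id_left p hp.2.1, pv_compose_id_right p hp.1]
  | n + 1 => by
    show pvCompose (pvCompose p (pvIter p n)) p = pvCompose p (pvIter p (n + 1))
    rw [← pv_compose_assoc p (pvIter p n) p (pv_iter_good p hp n).1 hp.2.1,
        pv_iter_succ_right p hp n]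

theorem pv_iter_double (p : List Int) (hp : pvGood p) :
    ∀ m, pvIter (pvCompose p p) m = pvIter p (2 * m)
  | 0 => rfl
  | m + 1 => by
    show pvCompose (pvCompose p p) (pvIter (pvCompose p p) m) = pvIter p (2 * m + 2)
    rw [pv_iter_double p hp m,
        ← pv_compose_assoc p p (pvIter p (2 * m)) hp.1 (pv_iter_good p hp (2 * m)).2.1]
    rfl

theorem pv_go_spec : ∀ (fuel : Nat) (k : Int), k.toNat < fuel → 0 ≤ k →
    ∀ base result, pvGood base → pvGood result →
    pvPermPowGo fuel base result k = pvCompose (pvIter base k.toNat) result := by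
  intro fuel
  induction fuel with
  | zero => intro k hN; omega
  | succ N ih =>
    intro k hN hk base result hb hr
    rw [pvPermPowGo]
    by_cases hpos : 0 < k
    · rw [if_pos hpos]
      have h2 : (0:Int) < 2 := by norm_num
      rw [PySem.Int.floordiv_eq_ediv_of_pos h2, PySem.Int.mod_eq_emod_of_pos h2]
      have hbb : pvGood (pvCompose base base) := pv_good_compose _ _ hb hb
      set m : Nat := (k / 2).toNat with hm
      have hmN : (k / 2).toNat < N := by omega
      have hk2 : 0 ≤ k / 2 := by omega
      by_cases hodd : k % 2 = 1
      · rw [if_pos hodd]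
        rw [ih (k / 2) hmN hk2 (pvCompose base base) (pvCompose base result) hbb
              (pv_good_compose _ _ hb hr),
            pv_iter_double base hb m,
            pv_compose_assoc (pvIter base (2 * m)) base result hb.1 hr.2.1,
            pv_iter_succ_right base hb (2 * m)]
        have : k.toNat = 2 * m + 1 := by omega
        rw [this]
      · rw [if_neg hodd]
        rw [ih (k / 2) hmN hk2 (pvCompose base base) result hbb hr,
            pv_iter_double base hb m]
        have : k.toNat = 2 * m := by omega
        rw [this]
    · rw [if_neg hpos]
      have : k.toNat = 0 := by omega
      rw [this]
      exact (pv_compose_id_left result hr.2.1).symm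

theorem pv_permPow_spec (p : List Int) (k : Int) (hp : pvGood p) (hk : 0 ≤ k) :
    pvPermPow p k = pvIter p k.toNat := by
  rw [pvPermPow, hp.1]
  rw [show (List.range 128).map Int.ofNat = pvId128 from rfl]
  rw [pv_go_spec (k.toNat + 1) k (by omega) hk p pvId128 hp pv_good_id]
  exact pv_compose_id_right _ (pv_iter_good p hp k.toNat).1

-- ---- A's table build equals pvIter ----

theorem pv_pyRange128_eq_id : PySem.List.pyRange 0 128 1 = pvId128 := by decide

theorem pv_row0_eq (tbl : List Int) (h : tbl.length = 128) :
    (PySem.List.pyRange 0 128 1).map (fun i => PySem.List.pyGetD tbl i 0) = tbl := by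
  rw [pv_pyRange128_eq_id]
  exact pv_compose_id_right tbl h

theorem pv_stepA_eq (tbl cur : List Int) (hcur : pvGood cur) :
    pvStepA tbl cur = pvCompose tbl cur := by
  rw [pvStepA, pv_pyRange128_eq_id]
  show pvCompose tbl (pvCompose cur pvId128) = pvCompose tbl cur
  rw [pv_compose_id_right cur hcur.1]

theorem pv_foldl_pair_iterate (f g : List Int → List Int) :
    ∀ (l : List Int) (a b : List Int),
      l.foldl (fun (st : List Int × List Int) _ => (f st.1, g st.2)) (a, b)
        = (f^[l.length] a, g^[l.length] b)
  | [], a, b => rfl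
  | x :: l, a, b => by
    simp only [List.foldl_cons, List.length_cons, Function.iterate_succ_apply]
    exact pv_foldl_pair_iterate f g l (f a) (g b)

theorem pv_iterate_stepA (tbl : List Int) (hp : pvGood tbl) :
    ∀ n, (pvStepA tbl)^[n] tbl = pvIter tbl (n + 1)
  | 0 => by
    show tbl = pvCompose tbl pvId128
    exact (pv_compose_id_right tbl hp.1).symm
  | n + 1 => by
    rw [Function.iterate_succ_apply', pv_iterate_stepA tbl hp n,
        pv_stepA_eq tbl _ (pv_iter_good tbl hp (n + 1))]
    rfl

theorem pv_rowsA_eq (offset : Int) (h : 0 ≤ offset) :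
    pvRowsA offset = (pvIter pvInvKpLeft (offset.toNat + 1), pvIter pvInvKpRight (offset.toNat + 1)) := by
  rw [pvRowsA, pv_row0_eq _ pv_good_left.1, pv_row0_eq _ pv_good_right.1,
      pv_foldl_pair_iterate (pvStepA pvInvKpLeft) (pvStepA pvInvKpRight)]
  rw [PySem.List.length_pyRange_one]
  have : ((offset + 1) - 1).toNat = offset.toNat := by omega
  rw [this, pv_iterate_stepA pvInvKpLeft pv_good_left, pv_iterate_stepA pvInvKpRight pv_good_right]

-- ---- selection loops ----

theorem pv_selA_eq (al : List Int) (rows : List Int × List Int) :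
    pvSelectA al rows =
      (((PySem.List.pyRange 0 128 1).filter (fun i => al.contains i)).map
          (fun i => PySem.List.pyGetD rows.1 i 0),
       ((PySem.List.pyRange 0 128 1).filter (fun i => al.contains i)).map
          (fun i => PySem.List.pyGetD rows.2 i 0)) := by
  rw [pvSelectA]
  suffices h : ∀ (l : List Int) (a b : List Int),
      l.foldl (fun (st : List Int × List Int) i =>
        if al.contains i then
          (st.1 ++ [PySem.List.pyGetD rows.1 i 0], st.2 ++ [PySem.List.pyGetD rows.2 i 0])
        else st) (a, b)
      = (a ++ (l.filter (fun i => al.contains i)).map (fun i => PySem.List.pyGetD rows.1 i 0),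
         b ++ (l.filter (fun i => al.contains i)).map (fun i => PySem.List.pyGetD rows.2 i 0)) by
    simpa using h (PySem.List.pyRange 0 128 1) [] []
  intro l
  induction l with
  | nil => simp
  | cons x l ih =>
    intro a b
    simp only [List.foldl_cons, List.filter_cons]
    by_cases hx : al.contains x = true
    · rw [if_pos hx, if_pos hx, ih]
      simp [List.append_assoc]
    · rw [if_neg hx, if_neg hx, ih]

theorem pv_contains_eq_decide (s : List Int) (x : Int) : s.contains x = decide (x ∈ s) := by
  by_cases h : x ∈ s <;> simp [h]

theorem pv_selB_eq (al : List Int) :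
    pvSelB (PySem.Set.ofList al) = (PySem.List.pyRange 0 128 1).filter (fun i => al.contains i) := by
  rw [pvSelB]
  refine List.filter_congr ?_
  intro x _
  show PySem.Set.contains (PySem.Set.ofList al) x = al.contains x
  rw [PySem.Set.contains, pv_contains_eq_decide, pv_contains_eq_decide]
  simp [PySem.Set.mem_ofList]

-- ---- B's right-position dict ----

theorem pv_rpos_get (r : List Int) : ∀ (n : Int) (d : PySem.Dict Int Int), r.Nodup →
    ∀ v, ((PySem.List.enumerate r n).foldl
            (fun (d : PySem.Dict Int Int) p => d.insert p.2 p.1) d).get? v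
      = if v ∈ r then some (n + ((PySem.List.index? r v).getD 0 : Nat)) else d.get? v := by
  induction r with
  | nil => intro n d _ v; simp [PySem.List.enumerate]
  | cons x r ih =>
    intro n d hnd v
    have hx : x ∉ r := (List.nodup_cons.mp hnd).1
    have hr : r.Nodup := (List.nodup_cons.mp hnd).2
    rw [PySem.List.enumerate_cons]
    simp only [List.foldl_cons]
    by_cases hv : v = x
    · subst hv
      rw [ih (n + 1) (d.insert v n) hr v, if_neg hx, if_pos (List.mem_cons_self)]
      rw [PySem.Dict.get?_insert_self, PySem.List.index?_cons_self]
      simp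
    · by_cases hm : v ∈ r
      · rw [ih (n + 1) (d.insert x n) hr v, if_pos hm, if_pos (List.mem_cons_of_mem x hm)]
        rw [PySem.List.index?_cons_of_ne r (fun he => hv he.symm)]
        obtain ⟨k, hk⟩ := Option.isSome_iff_exists.mp ((PySem.List.index?_isSome_iff r v).mpr hm)
        rw [hk]
        simp only [Option.map_some, Option.getD_some]
        congr 1
        push_cast
        ring
      · rw [ih (n + 1) (d.insert x n) hr v, if_neg hm,
            if_neg (by simp [hv, hm]),
            PySem.Dict.get?_insert_of_ne d n hv]

theorem pv_rposB_get (r : List Int) (hr : r.Nodup) (v : Int) :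
    (pvRposB r).get? v
      = if v ∈ r then some (((PySem.List.index? r v).getD 0 : Nat) : Int) else none := by
  rw [pvRposB, pv_rpos_get r 0 PySem.Dict.empty hr v]
  by_cases h : v ∈ r
  · simp [h]
  · simp [h, PySem.Dict.empty, PySem.Dict.get?]

theorem pv_rposB_keys (r : List Int) : (pvRposB r).keys = PySem.Set.ofList r := by
  rw [pvRposB]
  rw [PySem.Dict.keys_foldl_insert_key (PySem.List.enumerate r 0) (fun p => p.2) (fun _ p => p.1)]
  rw [show (PySem.Dict.empty : PySem.Dict Int Int).keys = PySem.Set.empty from rfl]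
  rw [PySem.Set.update_empty, PySem.List.map_snd_enumerate]

theorem pv_rposB_contains (r : List Int) (v : Int) :
    (pvRposB r).contains v = decide (v ∈ r) := by
  rw [PySem.Dict.contains_eq_decide_mem_keys, pv_rposB_keys]
  simp [PySem.Set.mem_ofList]

-- ---- B's single scan ----

theorem pv_scan_aux (h : Int → Bool) (g : Int → Int) :
    ∀ (l : List Int) (n : Int) (s : List Int) (d : PySem.Dict Int Int),
      l.Nodup → (∀ x ∈ l, x ∉ s) → (∀ kk ∈ d.keys, kk < n) →
      (PySem.List.enumerate l n).foldl
        (fun (st : PySem.Set Int × PySem.Dict Int Int) p =>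
          if h p.2 then (PySem.Set.add st.1 p.2, st.2.insert p.1 (g p.2)) else st) (s, d)
      = (s ++ l.filter h,
         ⟨d.items ++ ((PySem.List.enumerate l n).filter (fun p => h p.2)).map
            (fun p => (p.1, g p.2))⟩) := by
  intro l
  induction l with
  | nil => intro n s d _ _ _; simp [PySem.List.enumerate]
  | cons x l ih =>
    intro n s d hnd hs hd
    have hx : x ∉ l := (List.nodup_cons.mp hnd).1
    have hl : l.Nodup := (List.nodup_cons.mp hnd).2
    have hxs : x ∉ s := hs x List.mem_cons_self
    have hcont : s.contains x = false := by
      rw [pv_contains_eq_decide]; simp [hxs]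
    have hdn : d.contains n = false := by
      rw [PySem.Dict.contains_eq_decide_mem_keys]
      simp only [decide_eq_false_iff_not]
      intro hmem
      exact absurd (hd n hmem) (lt_irrefl n)
    rw [PySem.List.enumerate_cons]
    simp only [List.foldl_cons, List.filter_cons]
    by_cases hh : h x = true
    · rw [if_pos hh, if_pos hh, if_pos hh]
      have hadd : PySem.Set.add s x = s ++ [x] := by
        rw [PySem.Set.add]
        simp [PySem.Set.contains, hxs]
      have hins : d.insert n (g x) = ⟨d.items ++ [(n, g x)]⟩ := by
        rw [PySem.Dict.insert, hdn]
        simp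
      rw [hadd, hins]
      rw [ih (n + 1) (s ++ [x]) ⟨d.items ++ [(n, g x)]⟩ hl
            (by intro y hy hmem
                rcases List.mem_append.mp hmem with hmem | hmem
                · exact hs y (List.mem_cons_of_mem x hy) hmem
                · have : y = x := by simpa using hmem
                  exact hx (this ▸ hy))
            (by intro kk hkk
                have : kk ∈ d.keys ∨ kk = n := by
                  simpa [PySem.Dict.keys] using hkk
                rcases this with h' | h'
                · have := hd kk h'; omega
                · omega)]
      simp [List.append_assoc]
    · rw [if_neg hh, if_neg hh, if_neg hh]
      rw [ih (n + 1) s d hl (fun y hy => hs y (List.mem_cons_of_mem x hy))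
            (fun kk hkk => lt_trans (hd kk hkk) (by omega))]

theorem pv_scanB_eq (rpos : PySem.Dict Int Int) (left : List Int) (hn : left.Nodup) :
    pvScanB rpos left
      = (left.filter (fun v => rpos.contains v),
         ⟨((PySem.List.enumerate left 0).filter (fun p => rpos.contains p.2)).map
            (fun p => (p.1, rpos.getD p.2 0))⟩) := by
  rw [pvScanB,
      pv_scan_aux (fun v => rpos.contains v) (fun v => rpos.getD v 0) left 0
        PySem.Set.empty PySem.Dict.empty hn (by intro x _; simp [PySem.Set.empty])
        (by intro kk hkk; simp [PySem.Dict.empty, PySem.Dict.keys] at hkk)]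
  simp [PySem.Set.empty, PySem.Dict.empty]

-- ---- A's common-indices dict ----

theorem pv_afold_eq (key val : Int → Int) :
    ∀ (l : List Int) (d : PySem.Dict Int Int),
      (∀ x ∈ l, key x ∉ d.keys) → (l.map key).Nodup →
      l.foldl (fun (d : PySem.Dict Int Int) e => d.insert (key e) (val e)) d
        = ⟨d.items ++ l.map (fun e => (key e, val e))⟩ := by
  intro l
  induction l with
  | nil => intro d _ _; simp
  | cons x l ih =>
    intro d hk hnd
    have hxl : key x ∉ l.map key := (List.nodup_cons.mp (by simpa using hnd)).1
    have hdx : d.contains (key x) = false := by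
      rw [PySem.Dict.contains_eq_decide_mem_keys]
      simp [hk x List.mem_cons_self]
    have hins : d.insert (key x) (val x) = ⟨d.items ++ [(key x, val x)]⟩ := by
      rw [PySem.Dict.insert, hdx]; simp
    simp only [List.foldl_cons]
    rw [hins, ih ⟨d.items ++ [(key x, val x)]⟩
          (by intro y hy hmem
              have h1 : key y ∉ d.keys := hk y (List.mem_cons_of_mem x hy)
              have h2 : key y ≠ key x := fun he => hxl (he ▸ List.mem_map_of_mem (f := key) hy)
              have : key y ∈ d.keys ∨ key y = key x := by
                simpa [PySem.Dict.keys] using hmem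
              rcases this with h' | h'
              · exact h1 h'
              · exact h2 h')
          ((List.nodup_cons.mp (by simpa using hnd)).2)]
    simp [List.append_assoc]

-- ---- positions vs enumerate ----

theorem pv_idx_enum (P : Int → Bool) (g : Int → Int) :
    ∀ (l : List Int) (n : Int), l.Nodup →
      (l.filter P).map (fun e => (n + ((PySem.List.index? l e).getD 0 : Nat), g e))
      = ((PySem.List.enumerate l n).filter (fun p => P p.2)).map (fun p => (p.1, g p.2)) := by
  intro l
  induction l with
  | nil => intro n _; simp [PySem.List.enumerate]
  | cons x l ih =>
    intro n hnd
    have hx : x ∉ l := (List.nodup_cons.mp hnd).1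
    have hl : l.Nodup := (List.nodup_cons.mp hnd).2
    rw [PySem.List.enumerate_cons]
    have htail :
        (l.filter P).map (fun e => (n + ((PySem.List.index? (x :: l) e).getD 0 : Nat), g e))
        = (l.filter P).map (fun e => ((n + 1) + ((PySem.List.index? l e).getD 0 : Nat), g e)) := by
      refine List.map_congr_left ?_
      intro e he
      have hel : e ∈ l := List.mem_of_mem_filter he
      have hne : x ≠ e := fun hxe => hx (hxe ▸ hel)
      rw [PySem.List.index?_cons_of_ne l hne]
      obtain ⟨k, hk⟩ := Option.isSome_iff_exists.mp ((PySem.List.index?_isSome_iff l e).mpr hel)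
      rw [hk]
      simp only [Option.map_some, Option.getD_some]
      have harith : n + ((k + 1 : Nat) : Int) = (n + 1) + (k : Int) := by push_cast; ring
      rw [harith]
    simp only [List.filter_cons]
    by_cases hP : P x = true
    · rw [if_pos hP, if_pos hP]
      simp only [List.map_cons]
      rw [PySem.List.index?_cons_self]
      simp only [Option.getD_some, Nat.cast_zero, add_zero]
      rw [htail, ih (n + 1) hl]
    · rw [if_neg hP, if_neg hP]
      rw [htail, ih (n + 1) hl]

-- ---- assembling the main theorem ----

theorem pv_lbl_nodup (P : Int → Bool) (tbl : List Int) (htbl : pvGood tbl) :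
    (((PySem.List.pyRange 0 128 1).filter P).map (fun i => PySem.List.pyGetD tbl i 0)).Nodup := by
  obtain ⟨hlen, hval, hnd⟩ := htbl
  refine List.Nodup.map_on ?_ ((PySem.List.nodup_pyRange_one 0 128).filter P)
  intro a ha b hb hab
  have ha' := PySem.List.mem_pyRange_one.mp (List.mem_of_mem_filter ha)
  have hb' := PySem.List.mem_pyRange_one.mp (List.mem_of_mem_filter hb)
  rw [PySem.List.pyGetD_eq_getElem _ _ ha'.1 (by rw [hlen]; omega; ),
      PySem.List.pyGetD_eq_getElem _ _ hb'.1 (by rw [hlen]; omega; )] at hab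
  have := (List.Nodup.getElem_inj_iff hnd).mp hab
  omega

theorem derive_involved_key_positions_spec_aux (offset : Int) (active_indices : List Int)
    (hpre : 0 ≤ offset) :
    derive_involved_key_positions offset active_indices
      = derive_involved_key_positions_alt offset active_indices := by
  rw [derive_involved_key_positions, derive_involved_key_positions_alt]
  have hn1 : (offset + 1).toNat = offset.toNat + 1 := by omega
  set L := pvIter pvInvKpLeft (offset.toNat + 1) with hL
  set R := pvIter pvInvKpRight (offset.toNat + 1) with hR
  have hGL : pvGood L := pv_iter_good _ pv_good_left _
  have hGR : pvGood R := pv_iter_good _ pv_good_right _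
  rw [pv_rowsA_eq offset hpre, pv_permPow_spec _ _ pv_good_left (by omega),
      pv_permPow_spec _ _ pv_good_right (by omega), hn1]
  rw [pv_selA_eq, pv_selB_eq]
  set P : Int → Bool := fun i => (pvExpandActive active_indices).contains i with hP
  set lbl := ((PySem.List.pyRange 0 128 1).filter P).map (fun i => PySem.List.pyGetD L i 0)
    with hlbl
  set lbr := ((PySem.List.pyRange 0 128 1).filter P).map (fun i => PySem.List.pyGetD R i 0)
    with hlbr
  have hlblN : lbl.Nodup := pv_lbl_nodup P L hGL
  have hlbrN : lbr.Nodup := pv_lbl_nodup P R hGR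
  -- the two membership predicates agree
  have hpred : ∀ v, (PySem.Set.contains (PySem.Set.ofList lbr) v) = (pvRposB lbr).contains v := by
    intro v
    rw [pv_rposB_contains, PySem.Set.contains, pv_contains_eq_decide]
    simp [PySem.Set.mem_ofList]
  -- third component
  have hinter : PySem.Set.inter (PySem.Set.ofList lbl) (PySem.Set.ofList lbr)
      = lbl.filter (fun v => (pvRposB lbr).contains v) := by
    rw [PySem.Set.inter, PySem.Set.ofList_eq_self_of_nodup lbl hlblN]
    exact List.filter_congr (fun x _ => hpred x)
  -- B's scan
  have hscan := pv_scanB_eq (pvRposB lbr) lbl hlblN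
  -- A's dict
  set keyf : Int → Int := fun e => (((PySem.List.index? lbl e).getD 0 : Nat) : Int) with hkeyf
  set valf : Int → Int := fun e => (((PySem.List.index? lbr e).getD 0 : Nat) : Int) with hvalf
  have hkeyinj : ∀ a ∈ lbl, ∀ b ∈ lbl, keyf a = keyf b → a = b := by
    intro a ha b hb hab
    obtain ⟨ka, hka⟩ := Option.isSome_iff_exists.mp ((PySem.List.index?_isSome_iff lbl a).mpr ha)
    obtain ⟨kb, hkb⟩ := Option.isSome_iff_exists.mp ((PySem.List.index?_isSome_iff lbl b).mpr hb)
    obtain ⟨hka', hgeta, _⟩ := PySem.List.getElem_of_index?_eq_some hka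
    obtain ⟨hkb', hgetb, _⟩ := PySem.List.getElem_of_index?_eq_some hkb
    rw [hkeyf] at hab
    simp only [hka, hkb, Option.getD_some] at hab
    have : ka = kb := by exact_mod_cast hab
    subst this
    rw [← hgeta, ← hgetb]
  have hAdict : pvCommonA lbl lbr (lbl.filter (fun v => (pvRposB lbr).contains v))
      = ⟨(lbl.filter (fun v => (pvRposB lbr).contains v)).map (fun e => (keyf e, valf e))⟩ := by
    rw [pvCommonA, pv_afold_eq keyf valf _ PySem.Dict.empty
          (by intro x _; simp [PySem.Dict.empty, PySem.Dict.keys])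
          (by refine List.Nodup.map_on ?_ (hlblN.filter _)
              intro a ha b hb
              exact hkeyinj a (List.mem_of_mem_filter ha) b (List.mem_of_mem_filter hb))]
    simp [PySem.Dict.empty]
  -- A's mapped pairs equal B's enumerate form
  have hmaps : (lbl.filter (fun v => (pvRposB lbr).contains v)).map (fun e => (keyf e, valf e))
      = ((PySem.List.enumerate lbl 0).filter (fun p => (pvRposB lbr).contains p.2)).map
          (fun p => (p.1, (pvRposB lbr).getD p.2 0)) := by
    rw [← pv_idx_enum (fun v => (pvRposB lbr).contains v) (fun v => (pvRposB lbr).getD v 0) lbl 0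
          hlblN]
    refine List.map_congr_left ?_
    intro e he
    have hmemr : e ∈ lbr := by
      have := List.of_mem_filter he
      rw [pv_rposB_contains] at this
      simpa using this
    have hval : (pvRposB lbr).getD e 0 = valf e := by
      rw [PySem.Dict.getD, pv_rposB_get lbr hlbrN e, if_pos hmemr]
      rfl
    rw [hval, hkeyf]
    simp
  refine Prod.ext rfl (Prod.ext rfl (Prod.ext ?_ ?_))
  · show PySem.Set.inter (PySem.Set.ofList lbl) (PySem.Set.ofList lbr)
        = (pvScanB (pvRposB lbr) lbl).1
    rw [hscan, hinter]
  · show (pvCommonA lbl lbr (PySem.Set.inter (PySem.Set.ofList lbl) (PySem.Set.ofList lbr))).items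
        = (pvScanB (pvRposB lbr) lbl).2.items
    rw [hscan, hinter, hAdict, hmaps]

-- ===== VERDICT (by name: the statement is the Claim_ definition above) =====
theorem derive_involved_key_positions_spec : Claim_equal_derive_involved_key_positions := by
  intro offset active_indices _ hpre
  exact derive_involved_key_positions_spec_aux offset active_indices hpre
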